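-- pv_equiv track=rewrite | github.com/debpalash/OmniVoice-Studio | backend/services/subtitle_segmenter.py | _hard_word_cut
-- ===== SOURCE A (Python) =====
-- from typing import List, Optional
--
-- def _hard_word_cut(text: str) -> Optional[int]:
--     """Space-boundary cut nearest the midpoint. None if no spaces."""
--     target = len(text) // 2
--     best = None
--     best_dist = None
--     for i, ch in enumerate(text):
--         if ch.isspace():
--             d = abs(i - target)
--             if best_dist is None or d < best_dist:
--                 best, best_dist = i, d
--     return best
-- ===== SOURCE B (Python) =====
-- from typing import Optional
--
-- def _hard_word_cut(text: str) -> Optional[int]: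
--     """Space-boundary cut nearest the midpoint. None if no spaces."""
--     n = len(text)
--     target = n // 2
--     d = 0
--     while target - d >= 0 or target + d < n:
--         i = target - d
--         if 0 <= i < n and text[i].isspace():
--             return i
--         j = target + d
--         if j < n and text[j].isspace():
--             return j
--         d += 1
--     return None
-- ===== Notes on version B (the rewrite author's own statement) =====
-- stated objective: alternative
-- what changed: Instead of scanning every character and maintaining a running best/best_dist pair, B expands outward from the midpoint (testing target-d before target+d at each distance d) and returns the first whitespace index it meets, which is the nearest one with leftmost tie-break.
import Mathlib
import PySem

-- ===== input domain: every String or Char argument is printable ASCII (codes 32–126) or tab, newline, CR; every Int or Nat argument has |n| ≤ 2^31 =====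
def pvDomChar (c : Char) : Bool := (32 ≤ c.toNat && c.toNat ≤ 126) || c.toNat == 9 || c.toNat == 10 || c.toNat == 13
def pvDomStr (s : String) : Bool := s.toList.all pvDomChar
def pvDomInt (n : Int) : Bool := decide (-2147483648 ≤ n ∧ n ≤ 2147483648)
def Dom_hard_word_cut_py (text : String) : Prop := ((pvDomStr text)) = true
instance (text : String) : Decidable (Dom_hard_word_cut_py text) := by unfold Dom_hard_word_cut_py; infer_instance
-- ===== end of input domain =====

-- B replaces A's full scan (running best/best_dist pair) by an outward walk from the midpoint
-- (left candidate tested before the right one at each distance), returning the first whitespace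
-- index met; same O(n) worst case, different traversal (objective: alternative).

-- ===== PORT A =====
-- loop body of A's 'for i, ch in enumerate(text)'
def stepA (target : Int) (st : Option Int × Option Int) (p : Int × Char) :
    Option Int × Option Int :=
  if PySem.Chars.isspace p.2 then
    let d : Int := |p.1 - target|
    match st.2 with
    | none => (some p.1, some d)
    | some bd => if d < bd then (some p.1, some d) else st
  else st

def hard_word_cut_py (text : String) : Option Int :=
  let target : Int := PySem.Int.floordiv (PySem.Str.len text) 2
  let st := (PySem.List.enumerate text.toList 0).foldl (stepA target) (none, none)
  st.1

-- ===== PORT B =====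
-- B's 'while target - d >= 0 or target + d < n' loop
def altLoop (cs : List Char) (n target : Int) : Nat → Int → Option Int
  | 0, _ => none
  | fuel + 1, d =>
    if 0 ≤ target - d ∨ target + d < n then
      if 0 ≤ target - d ∧ target - d < n ∧
          PySem.Chars.isspace (PySem.List.pyGetD cs (target - d) ' ') = true then
        some (target - d)
      else if target + d < n ∧
          PySem.Chars.isspace (PySem.List.pyGetD cs (target + d) ' ') = true then
        some (target + d)
      else
        altLoop cs n target fuel (d + 1)
    else
      none

def hard_word_cut_py_alt (text : String) : Option Int :=
  let n : Int := PySem.Str.len text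
  let target : Int := PySem.Int.floordiv n 2
  altLoop text.toList n target ((target + 1).toNat + (n - target).toNat) 0

-- ===== PRECONDITION & SPEC =====
def Spec_hard_word_cut_py (text : String) (out : Option Int) : Prop := out = hard_word_cut_py_alt text
instance (text : String) (out : Option Int) : Decidable (Spec_hard_word_cut_py text out) := by unfold Spec_hard_word_cut_py; infer_instance

-- ===== CLAIM (what is proved, stated in full; the proofs are below) =====
def Claim_equal_hard_word_cut_py : Prop := ∀ (text : String), Dom_hard_word_cut_py text → Spec_hard_word_cut_py text (hard_word_cut_py text)

-- ===== LEMMAS AND PROOFS =====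

-- The common characterisation: o is the whitespace index of cs nearest to target,
-- leftmost on ties; none iff cs has no whitespace.
def IsAns (cs : List Char) (target : Int) (o : Option Int) : Prop :=
  match o with
  | none => ∀ k : Nat, k < cs.length → PySem.Chars.isspace (cs.getD k ' ') = false
  | some i => ∃ k : Nat, k < cs.length ∧ i = (k : Int) ∧
      PySem.Chars.isspace (cs.getD k ' ') = true ∧
      ∀ j : Nat, j < cs.length → PySem.Chars.isspace (cs.getD j ' ') = true →
        (|i - target| < |(j : Int) - target| ∨
         (|i - target| = |(j : Int) - target| ∧ i ≤ (j : Int)))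

lemma isAns_unique (cs : List Char) (t : Int) (o₁ o₂ : Option Int)
    (h₁ : IsAns cs t o₁) (h₂ : IsAns cs t o₂) : o₁ = o₂ := by
  match o₁, o₂ with
  | none, none => rfl
  | none, some j =>
      obtain ⟨k, hk, _, hsp, _⟩ := h₂
      have := h₁ k hk; rw [this] at hsp; cases hsp
  | some i, none =>
      obtain ⟨k, hk, _, hsp, _⟩ := h₁
      have := h₂ k hk; rw [this] at hsp; cases hsp
  | some i, some j =>
      obtain ⟨k₁, hk₁, hi, hsp₁, hmin₁⟩ := h₁
      obtain ⟨k₂, hk₂, hj, hsp₂, hmin₂⟩ := h₂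
      have a := hmin₁ k₂ hk₂ hsp₂
      have b := hmin₂ k₁ hk₁ hsp₁
      rw [← hi] at b
      rw [← hj] at a
      simp only [Int.abs_eq_natAbs] at a b
      have : i = j := by omega
      simp [this]

lemma mem_enumerate_iff (cs : List Char) (s : Int) (p : Int × Char) :
    p ∈ PySem.List.enumerate cs s ↔
      ∃ k : Nat, k < cs.length ∧ p.1 = s + k ∧ p.2 = cs.getD k ' ' := by
  induction cs generalizing s with
  | nil => simp [PySem.List.enumerate_nil]
  | cons c cs ih =>
      rw [PySem.List.enumerate_cons]
      simp only [List.mem_cons, ih]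
      constructor
      · rintro (rfl | ⟨k, hk, h1, h2⟩)
        · exact ⟨0, by simp, by simp, by simp⟩
        · exact ⟨k + 1, by simpa using hk, by push_cast; omega, by simpa using h2⟩
      · rintro ⟨k, hk, h1, h2⟩
        match k with
        | 0 =>
            left
            simp at h1 h2
            obtain ⟨p1, p2⟩ := p
            simp_all
        | k + 1 =>
            right
            exact ⟨k, by simpa using hk, by push_cast at h1 ⊢; omega, by simpa using h2⟩


-- invariant for A's fold: the state is correct for the processed prefix ps
def okA (target : Int) (ps : List (Int × Char)) (st : Option Int × Option Int) : Prop :=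
  (st = (none, none) ∧ ∀ p ∈ ps, PySem.Chars.isspace p.2 = false) ∨
  (∃ b db, st = (some b, some db) ∧ db = |b - target| ∧
    (∃ ch, (b, ch) ∈ ps ∧ PySem.Chars.isspace ch = true) ∧
    ∀ p ∈ ps, PySem.Chars.isspace p.2 = true →
      (db < |p.1 - target| ∨ (db = |p.1 - target| ∧ b ≤ p.1)))

lemma okA_step (t : Int) (ps : List (Int × Char)) (st : Option Int × Option Int)
    (q : Int × Char) (hlt : ∀ p ∈ ps, p.1 < q.1) (h : okA t ps st) :
    okA t (ps ++ [q]) (stepA t st q) := by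
  by_cases hsp : PySem.Chars.isspace q.2 = true
  · rcases h with ⟨hst, hall⟩ | ⟨b, db, hst, hdb, ⟨ch, hch, hchsp⟩, hmin⟩
    · right
      refine ⟨q.1, |q.1 - t|, ?_, rfl, ⟨q.2, by simp, hsp⟩, ?_⟩
      · simp [stepA, hsp, hst]
      · intro p hp hpsp
        rcases List.mem_append.1 hp with hp | hp
        · exact absurd hpsp (by simp [hall p hp])
        · simp at hp; simp [hp]
    · right
      by_cases hlt2 : |q.1 - t| < db
      · refine ⟨q.1, |q.1 - t|, ?_, rfl, ⟨q.2, by simp, hsp⟩, ?_⟩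
        · simp [stepA, hsp, hst, hlt2]
        · intro p hp hpsp
          rcases List.mem_append.1 hp with hp | hp
          · rcases hmin p hp hpsp with h' | ⟨h', _⟩ <;> [left; left] <;> omega
          · simp at hp; simp [hp]
      · refine ⟨b, db, ?_, hdb, ⟨ch, List.mem_append_left _ hch, hchsp⟩, ?_⟩
        · simp [stepA, hsp, hst, hlt2]
        · intro p hp hpsp
          rcases List.mem_append.1 hp with hp | hp
          · exact hmin p hp hpsp
          · simp at hp
            have hb : b < q.1 := hlt (b, ch) hch
            rcases eq_or_lt_of_le (not_lt.1 hlt2) with h' | h'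
            · right; rw [hp]; exact ⟨h', le_of_lt hb⟩
            · left; rw [hp]; exact h'
  · have : stepA t st q = st := by simp [stepA, hsp]
    rw [this]
    rcases h with ⟨hst, hall⟩ | ⟨b, db, hst, hdb, ⟨ch, hch, hchsp⟩, hmin⟩
    · left
      refine ⟨hst, ?_⟩
      intro p hp
      rcases List.mem_append.1 hp with hp | hp
      · exact hall p hp
      · simp at hp; rw [hp]; simpa using hsp
    · right
      refine ⟨b, db, hst, hdb, ⟨ch, List.mem_append_left _ hch, hchsp⟩, ?_⟩
      intro p hp hpsp
      rcases List.mem_append.1 hp with hp | hp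
      · exact hmin p hp hpsp
      · simp at hp; rw [hp] at hpsp; exact absurd hpsp (by simpa using hsp)

lemma okA_foldl (t : Int) (cs : List Char) (s : Int) (ps : List (Int × Char))
    (st : Option Int × Option Int) (h : okA t ps st) (hlt : ∀ p ∈ ps, p.1 < s) :
    okA t (ps ++ PySem.List.enumerate cs s) ((PySem.List.enumerate cs s).foldl (stepA t) st) := by
  induction cs generalizing s ps st with
  | nil => simpa [PySem.List.enumerate_nil] using h
  | cons c cs ih =>
      rw [PySem.List.enumerate_cons]
      simp only [List.foldl_cons]
      have h1 := okA_step t ps st (s, c) hlt h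
      have h2 := ih (s + 1) (ps ++ [(s, c)]) (stepA t st (s, c)) h1 (by
        intro p hp
        rcases List.mem_append.1 hp with hp | hp
        · exact lt_trans (hlt p hp) (by omega)
        · simp at hp; subst hp; exact lt_add_one s)
      simpa [List.append_assoc] using h2

lemma A_isAns (cs : List Char) (t : Int) :
    IsAns cs t ((PySem.List.enumerate cs 0).foldl (stepA t) (none, none)).1 := by
  have h := okA_foldl t cs 0 [] (none, none)
    (Or.inl ⟨rfl, by simp⟩) (by simp)
  simp only [List.nil_append] at h
  rcases h with ⟨hst, hall⟩ | ⟨b, db, hst, hdb, ⟨ch, hch, hchsp⟩, hmin⟩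
  · rw [hst]
    intro k hk
    have hm : ((k : Int), cs.getD k ' ') ∈ PySem.List.enumerate cs 0 :=
      (mem_enumerate_iff cs 0 _).2 ⟨k, hk, by simp, rfl⟩
    exact hall ((k : Int), cs.getD k ' ') hm
  · rw [hst]
    obtain ⟨k, hk, hb, hch2⟩ := (mem_enumerate_iff cs 0 _).1 hch
    refine ⟨k, hk, by simpa using hb, by rw [← hch2]; exact hchsp, ?_⟩
    intro j hj hjsp
    have hm : ((j : Int), cs.getD j ' ') ∈ PySem.List.enumerate cs 0 :=
      (mem_enumerate_iff cs 0 _).2 ⟨j, hj, by simp, rfl⟩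
    have h2 := hmin ((j : Int), cs.getD j ' ') hm hjsp
    rw [hdb] at h2
    exact h2

lemma pyGetD_eq_getD (cs : List Char) (i : Int) (h0 : 0 ≤ i) (h1 : i < (cs.length : Int)) :
    PySem.List.pyGetD cs i ' ' = cs.getD i.toNat ' ' := by
  rw [PySem.List.pyGetD_eq_getElem (xs := cs) (d := ' ') h0 h1,
    List.getD_eq_getElem cs ' ' (by omega)]

lemma altLoop_isAns (cs : List Char) (n t : Int) (hn : n = (cs.length : Int)) (ht : 0 ≤ t) :
    ∀ fuel : Nat, ∀ d : Int, (t + 1 - d).toNat + (n - t - d).toNat ≤ fuel → 0 ≤ d →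
      (∀ j : Nat, j < cs.length → PySem.Chars.isspace (cs.getD j ' ') = true →
        d ≤ |(j : Int) - t|) →
      IsAns cs t (altLoop cs n t fuel d) := by
  intro fuel
  induction fuel with
  | zero =>
      intro d hle hd hmin k hk
      cases hx : PySem.Chars.isspace (cs.getD k ' ') with
      | false => rfl
      | true =>
          have h1 := hmin k hk hx
          simp only [Int.abs_eq_natAbs] at h1
          omega
  | succ m ih =>
      intro d hle hd hmin
      simp only [altLoop]
      by_cases hc : 0 ≤ t - d ∨ t + d < n
      · rw [if_pos hc]
        split_ifs with h1 h2
        · -- returns some (t - d)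
          obtain ⟨ha, hb, hsp⟩ := h1
          rw [pyGetD_eq_getD cs (t - d) ha (by omega)] at hsp
          refine ⟨(t - d).toNat, by omega, by omega, hsp, ?_⟩
          intro j hj hjsp
          have h2 := hmin j hj hjsp
          simp only [Int.abs_eq_natAbs] at h2 ⊢
          omega
        · -- returns some (t + d)
          obtain ⟨hb, hsp⟩ := h2
          have ha : 0 ≤ t + d := by omega
          rw [pyGetD_eq_getD cs (t + d) ha (by omega)] at hsp
          have hdpos : 0 < d := by
            rcases Int.lt_or_le 0 d with h | h
            · exact h
            · exfalso
              have hd0 : d = 0 := by omega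
              subst hd0
              exact h1 ⟨by omega, by simpa using hb, by
                rw [pyGetD_eq_getD cs (t - 0) (by omega) (by omega)]
                simpa using hsp⟩
          refine ⟨(t + d).toNat, by omega, by omega, hsp, ?_⟩
          intro j hj hjsp
          have hge := hmin j hj hjsp
          by_cases hjl : (j : Int) = t - d
          · exfalso
            refine h1 ⟨by omega, by omega, ?_⟩
            rw [pyGetD_eq_getD cs (t - d) (by omega) (by omega)]
            have : (t - d).toNat = j := by omega
            rw [this]
            exact hjsp
          · simp only [Int.abs_eq_natAbs] at hge ⊢
            omega
        · -- recursive call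
          apply ih (d + 1) (by omega) (by omega)
          intro j hj hjsp
          have hge := hmin j hj hjsp
          by_cases hjl : (j : Int) = t - d
          · exfalso
            refine h1 ⟨by omega, by omega, ?_⟩
            rw [pyGetD_eq_getD cs (t - d) (by omega) (by omega)]
            have : (t - d).toNat = j := by omega
            rw [this]
            exact hjsp
          · by_cases hjr : (j : Int) = t + d
            · exfalso
              refine h2 ⟨by omega, ?_⟩
              rw [pyGetD_eq_getD cs (t + d) (by omega) (by omega)]
              have : (t + d).toNat = j := by omega
              rw [this]
              exact hjsp
            · simp only [Int.abs_eq_natAbs] at hge ⊢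
              omega
      · rw [if_neg hc]
        intro k hk
        cases hx : PySem.Chars.isspace (cs.getD k ' ') with
        | false => rfl
        | true =>
            have h1 := hmin k hk hx
            simp only [Int.abs_eq_natAbs] at h1
            omega

theorem main_equal (text : String) :
    hard_word_cut_py text = hard_word_cut_py_alt text := by
  have hlen : PySem.Str.len text = (text.toList.length : Int) := by
    simp [PySem.Str.len_eq]
  have hfd : PySem.Int.floordiv ((text.toList.length : Nat) : Int) 2
      = ((text.toList.length / 2 : Nat) : Int) := by
    exact_mod_cast PySem.Int.floordiv_natCast text.toList.length 2
  simp only [hard_word_cut_py, hard_word_cut_py_alt, hlen]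
  apply isAns_unique text.toList (PySem.Int.floordiv ((text.toList.length : Nat) : Int) 2)
  · exact A_isAns text.toList _
  · apply altLoop_isAns text.toList _ _ rfl (by rw [hfd]; positivity)
      ((PySem.Int.floordiv ((text.toList.length : Nat) : Int) 2 + 1).toNat
        + (((text.toList.length : Nat) : Int) - PySem.Int.floordiv ((text.toList.length : Nat) : Int) 2).toNat)
      0 (by omega) le_rfl
    intro j hj hjsp
    exact abs_nonneg _

-- ===== VERDICT (by name: the statement is the Claim_ definition above) =====
theorem hard_word_cut_py_spec : Claim_equal_hard_word_cut_py := by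
  intro text _
  unfold Spec_hard_word_cut_py
  exact main_equal text
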